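-- pv_equiv track=rewrite | github.com/nicolaepetridean/codility_solutions | zinc2018.py | solution
-- ===== SOURCE A (Python) =====
-- def solution(A):
--     if len(A) < 3:
--         return 0
--
--     day_1_index = 0
--     day_2_index = 1
--     day_3_index = 2
--
--     possibilities = set()
--     n = len(A)
--
--     while day_1_index <= n - 3:
--         posibility = (str(A[day_1_index]), str(A[day_2_index]), str(A[day_3_index]))
--         possibilities.add("".join(list(posibility)))
--
--         if (day_3_index < n -1):
--             day_3_index += 1
--             continue
--         if (day_2_index < n - 2):
--             day_2_index += 1
--             day_3_index = day_2_index + 1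
--             continue
--         if (day_1_index < n - 3):
--             day_1_index += 1
--             day_2_index = day_1_index + 1
--             day_3_index = day_2_index + 1
--         else :
--             break
--
--
--     return len(possibilities)
-- ===== SOURCE B (Python) =====
-- def solution(A):
--     singles = set()
--     pairs = set()
--     triples = set()
--     for v in A:
--         s = str(v)
--         triples |= {p + s for p in pairs}
--         pairs |= {q + s for q in singles}
--         singles.add(s)
--     return len(triples)
-- ===== Notes on version B (the rewrite author's own statement) =====
-- stated objective: faster
-- what changed: Replaces the three-index O(n^3) triple enumeration by a single forward pass maintaining sets of distinct single/pair/triple concatenations of earlier elements, joining each new element onto the existing pair set.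
import Mathlib
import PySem

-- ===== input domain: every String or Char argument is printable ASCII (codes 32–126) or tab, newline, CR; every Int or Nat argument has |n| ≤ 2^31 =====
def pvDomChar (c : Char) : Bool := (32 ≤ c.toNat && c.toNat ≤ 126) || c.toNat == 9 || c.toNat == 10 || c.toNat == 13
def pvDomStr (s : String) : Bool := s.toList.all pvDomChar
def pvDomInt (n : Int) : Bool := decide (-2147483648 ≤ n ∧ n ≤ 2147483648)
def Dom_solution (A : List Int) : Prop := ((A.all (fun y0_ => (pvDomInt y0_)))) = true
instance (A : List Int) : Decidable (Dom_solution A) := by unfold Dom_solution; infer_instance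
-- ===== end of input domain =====

-- B replaces A's O(n^3) three-index enumeration of triples by a single forward pass that
-- maintains the distinct single/pair/triple concatenations of the elements seen so far.

-- ===== PORT A =====
-- str(A[i]) + str(A[j]) + str(A[k]) ("".join of the three strings = concatenation, exact).
-- Indices are in range whenever the loop body runs (0 ≤ i < j < k < n), so .getD 0 is never taken.
def cat3 (A : List Int) (a b c : Nat) : String :=
  PySem.Int.toStr ((PySem.List.pyGet? A (a : Int)).getD 0) ++
  PySem.Int.toStr ((PySem.List.pyGet? A (b : Int)).getD 0) ++
  PySem.Int.toStr ((PySem.List.pyGet? A (c : Int)).getD 0)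

-- the while loop, step for step; counters are Nat (they are 0 ≤ · in Python, and solution
-- only calls this with 3 ≤ n, where Nat subtraction n-3, n-2, n-1 agrees with Python's).
def solStep (A : List Int) (n i j k : Nat) (poss : PySem.Set String) : PySem.Set String :=
  if i ≤ n - 3 then
    let poss' := PySem.Set.add poss (cat3 A i j k)
    if k < n - 1 then solStep A n i j (k+1) poss'
    else if j < n - 2 then solStep A n i (j+1) (j+2) poss'
    else if i < n - 3 then solStep A n (i+1) (i+2) (i+3) poss'
    else poss'
  else poss
termination_by (n - i, n - j, n - k)
decreasing_by all_goals (first | (apply Prod.Lex.left; omega)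
                               | (apply Prod.Lex.right; first | (apply Prod.Lex.left; omega) | (apply Prod.Lex.right; omega)))

def solution (A : List Int) : Int :=
  if A.length < 3 then 0
  else PySem.Set.len (solStep A A.length 0 1 2 PySem.Set.empty)

-- ===== PORT B =====
-- one iteration of B's for-loop: s = str(v); triples |= pairs+s; pairs |= singles+s; singles.add(s)
def zincStep (st : PySem.Set String × PySem.Set String × PySem.Set String) (v : Int) :
    PySem.Set String × PySem.Set String × PySem.Set String :=
  let s := PySem.Int.toStr v
  (PySem.Set.add st.1 s,
   PySem.Set.union st.2.1 (List.map (fun q => q ++ s) st.1),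
   PySem.Set.union st.2.2 (List.map (fun p => p ++ s) st.2.1))

def solution_alt (A : List Int) : Int :=
  PySem.Set.len (A.foldl zincStep (PySem.Set.empty, PySem.Set.empty, PySem.Set.empty)).2.2

-- ===== PRECONDITION & SPEC =====
def Spec_solution (A : List Int) (out : Int) : Prop := out = solution_alt A
instance (A : List Int) (out : Int) : Decidable (Spec_solution A out) := by unfold Spec_solution; infer_instance

-- ===== CLAIM (what is proved, stated in full; the proofs are below) =====
def Claim_equal_solution : Prop := ∀ (A : List Int), Dom_solution A → Spec_solution A (solution A)

-- ===== LEMMAS AND PROOFS =====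

-- lexicographic "at or after (i,j,k)"
def lexGe (a b c i j k : Nat) : Prop := i < a ∨ (i = a ∧ (j < b ∨ (j = b ∧ k ≤ c)))

theorem mem_solStep (A : List Int) (n i j k : Nat) (poss : PySem.Set String) (x : String) :
    n = A.length → i < j → j < k → k < n →
    (x ∈ solStep A n i j k poss ↔
      x ∈ poss ∨ ∃ a b c, a < b ∧ b < c ∧ c < n ∧ lexGe a b c i j k ∧ x = cat3 A a b c) := by
  induction i, j, k, poss using solStep.induct A n with
  | case1 i j k poss hle poss' hk ih =>
    intro hn h1 h2 h3
    rw [solStep]; simp only [if_pos hle, if_pos hk]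
    rw [ih hn h1 (by omega) (by omega)]
    simp only [poss', PySem.Set.mem_add]
    constructor
    · rintro ((hp | ht) | ⟨a, b, c, hab, hbc, hcn, hge, rfl⟩)
      · exact Or.inl hp
      · exact Or.inr ⟨i, j, k, h1, h2, h3, by unfold lexGe; omega, ht⟩
      · exact Or.inr ⟨a, b, c, hab, hbc, hcn, by unfold lexGe at *; omega, rfl⟩
    · rintro (hp | ⟨a, b, c, hab, hbc, hcn, hge, rfl⟩)
      · exact Or.inl (Or.inl hp)
      · by_cases he : a = i ∧ b = j ∧ c = k
        · obtain ⟨rfl, rfl, rfl⟩ := he; exact Or.inl (Or.inr rfl)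
        · exact Or.inr ⟨a, b, c, hab, hbc, hcn, by unfold lexGe at *; omega, rfl⟩
  | case2 i j k poss hle poss' hk hj ih =>
    intro hn h1 h2 h3
    rw [solStep]; simp only [if_pos hle, if_neg hk, if_pos hj]
    rw [ih hn (by omega) (by omega) (by omega)]
    simp only [poss', PySem.Set.mem_add]
    constructor
    · rintro ((hp | ht) | ⟨a, b, c, hab, hbc, hcn, hge, rfl⟩)
      · exact Or.inl hp
      · exact Or.inr ⟨i, j, k, h1, h2, h3, by unfold lexGe; omega, ht⟩
      · exact Or.inr ⟨a, b, c, hab, hbc, hcn, by unfold lexGe at *; omega, rfl⟩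
    · rintro (hp | ⟨a, b, c, hab, hbc, hcn, hge, rfl⟩)
      · exact Or.inl (Or.inl hp)
      · by_cases he : a = i ∧ b = j ∧ c = k
        · obtain ⟨rfl, rfl, rfl⟩ := he; exact Or.inl (Or.inr rfl)
        · exact Or.inr ⟨a, b, c, hab, hbc, hcn, by unfold lexGe at *; omega, rfl⟩
  | case3 i j k poss hle poss' hk hj hi ih =>
    intro hn h1 h2 h3
    rw [solStep]; simp only [if_pos hle, if_neg hk, if_neg hj, if_pos hi]
    rw [ih hn (by omega) (by omega) (by omega)]
    simp only [poss', PySem.Set.mem_add]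
    constructor
    · rintro ((hp | ht) | ⟨a, b, c, hab, hbc, hcn, hge, rfl⟩)
      · exact Or.inl hp
      · exact Or.inr ⟨i, j, k, h1, h2, h3, by unfold lexGe; omega, ht⟩
      · exact Or.inr ⟨a, b, c, hab, hbc, hcn, by unfold lexGe at *; omega, rfl⟩
    · rintro (hp | ⟨a, b, c, hab, hbc, hcn, hge, rfl⟩)
      · exact Or.inl (Or.inl hp)
      · by_cases he : a = i ∧ b = j ∧ c = k
        · obtain ⟨rfl, rfl, rfl⟩ := he; exact Or.inl (Or.inr rfl)
        · exact Or.inr ⟨a, b, c, hab, hbc, hcn, by unfold lexGe at *; omega, rfl⟩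
  | case4 i j k poss hle hk hj hi =>
    intro hn h1 h2 h3
    rw [solStep]; simp only [if_pos hle, if_neg hk, if_neg hj, if_neg hi]
    simp only [PySem.Set.mem_add]
    constructor
    · rintro (hp | ht)
      · exact Or.inl hp
      · exact Or.inr ⟨i, j, k, h1, h2, h3, by unfold lexGe; omega, ht⟩
    · rintro (hp | ⟨a, b, c, hab, hbc, hcn, hge, rfl⟩)
      · exact Or.inl hp
      · have : a = i ∧ b = j ∧ c = k := by unfold lexGe at hge; omega
        obtain ⟨rfl, rfl, rfl⟩ := this; exact Or.inr rfl
  | case5 i j k poss hle =>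
    intro hn h1 h2 h3
    rw [solStep]; simp only [if_neg hle]
    constructor
    · exact Or.inl
    · rintro (hp | ⟨a, b, c, hab, hbc, hcn, hge, rfl⟩)
      · exact hp
      · exfalso; unfold lexGe at hge; omega

theorem nodup_solStep (A : List Int) (n i j k : Nat) (poss : PySem.Set String)
    (h : poss.Nodup) : (solStep A n i j k poss).Nodup := by
  induction i, j, k, poss using solStep.induct A n with
  | case1 i j k poss hle poss' hk ih => rw [solStep]; simp only [if_pos hle, if_pos hk]; exact ih (PySem.Set.nodup_add _ _ h)
  | case2 i j k poss hle poss' hk hj ih => rw [solStep]; simp only [if_pos hle, if_neg hk, if_pos hj]; exact ih (PySem.Set.nodup_add _ _ h)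
  | case3 i j k poss hle poss' hk hj hi ih => rw [solStep]; simp only [if_pos hle, if_neg hk, if_neg hj, if_pos hi]; exact ih (PySem.Set.nodup_add _ _ h)
  | case4 i j k poss hle hk hj hi => rw [solStep]; simp only [if_pos hle, if_neg hk, if_neg hj, if_neg hi]; exact PySem.Set.nodup_add _ _ h
  | case5 i j k poss hle => rw [solStep]; simp only [if_neg hle]; exact h

theorem cat3_eq (A : List Int) (a b c : Nat) (ha : a < A.length) (hb : b < A.length)
    (hc : c < A.length) :
    cat3 A a b c = PySem.Int.toStr A[a] ++ PySem.Int.toStr A[b] ++ PySem.Int.toStr A[c] := by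
  unfold cat3
  rw [PySem.List.pyGet?_natCast, PySem.List.pyGet?_natCast, PySem.List.pyGet?_natCast,
    List.getElem?_eq_getElem ha, List.getElem?_eq_getElem hb, List.getElem?_eq_getElem hc]
  rfl

-- a step: prepend l[i] to a sublist of drop (i+1) to get a sublist of drop i
theorem cons_getElem_sublist_drop (l : List Int) (i : Nat) (h : i < l.length) (t : List Int)
    (ht : t.Sublist (l.drop (i+1))) : (l[i] :: t).Sublist (l.drop i) := by
  rw [List.drop_eq_getElem_cons h]
  exact List.cons_sublist_cons.mpr ht

theorem triple_sublist (A : List Int) (a b c : Nat) (hab : a < b) (hbc : b < c)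
    (hc : c < A.length) : ([A[a], A[b], A[c]'hc]).Sublist A := by
  have h1 : ([A[c]'hc] : List Int).Sublist (A.drop (b+1)) := by
    apply List.singleton_sublist.mpr
    have : (A.drop (b+1))[c - (b+1)]'(by rw [List.length_drop]; omega) = A[c]'hc := by
      rw [List.getElem_drop]; congr 1; omega
    rw [← this]; exact List.getElem_mem _
  have h2 : ([A[b], A[c]'hc] : List Int).Sublist (A.drop b) :=
    cons_getElem_sublist_drop A b (by omega) _ h1
  have h2' : ([A[b], A[c]'hc] : List Int).Sublist (A.drop (a+1)) :=
    h2.trans (List.drop_sublist_drop_left A (by omega))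
  have h3 : ([A[a], A[b], A[c]'hc] : List Int).Sublist (A.drop a) :=
    cons_getElem_sublist_drop A a (by omega) _ h2'
  exact h3.trans (List.drop_sublist a A)

theorem sublist_triple_idx (A : List Int) (u v w : Int) (h : ([u, v, w] : List Int).Sublist A) :
    ∃ (a b c : Nat) (hab : a < b) (hbc : b < c) (hc : c < A.length),
      u = A[a]'(by omega) ∧ v = A[b]'(by omega) ∧ w = A[c]'hc := by
  obtain ⟨f, hf⟩ := List.sublist_iff_exists_fin_orderEmbedding_get_eq.mp h
  have h0 := hf ⟨0, by norm_num⟩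
  have h1 := hf ⟨1, by norm_num⟩
  have h2 := hf ⟨2, by norm_num⟩
  refine ⟨f ⟨0, by norm_num⟩, f ⟨1, by norm_num⟩, f ⟨2, by norm_num⟩,
    f.strictMono (Fin.mk_lt_mk.mpr (by norm_num)),
    f.strictMono (Fin.mk_lt_mk.mpr (by norm_num)),
    (f ⟨2, by norm_num⟩).isLt, ?_, ?_, ?_⟩
  · simpa [List.get] using h0
  · simpa [List.get] using h1
  · simpa [List.get] using h2

-- index triples ↔ length-3 sublists
theorem idx_triple_iff_sublist (A : List Int) (x : String) :
    (∃ a b c, a < b ∧ b < c ∧ c < A.length ∧ x = cat3 A a b c) ↔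
    (∃ u v w, ([u, v, w] : List Int).Sublist A ∧
      x = PySem.Int.toStr u ++ PySem.Int.toStr v ++ PySem.Int.toStr w) := by
  constructor
  · rintro ⟨a, b, c, hab, hbc, hc, rfl⟩
    exact ⟨A[a], A[b], A[c], triple_sublist A a b c hab hbc hc,
      cat3_eq A a b c (by omega) (by omega) hc⟩
  · rintro ⟨u, v, w, hsub, rfl⟩
    obtain ⟨a, b, c, hab, hbc, hc, rfl, rfl, rfl⟩ := sublist_triple_idx A u v w hsub
    exact ⟨a, b, c, hab, hbc, hc, (cat3_eq A a b c (by omega) (by omega) hc).symm⟩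

-- sublist-of-concat decompositions
theorem sublist1_concat (l : List Int) (v a : Int) :
    ([a] : List Int).Sublist (l ++ [v]) ↔ ([a] : List Int).Sublist l ∨ a = v := by
  simp [List.singleton_sublist]
theorem sublist2_concat (l : List Int) (v a b : Int) :
    ([a, b] : List Int).Sublist (l ++ [v]) ↔
      ([a, b] : List Int).Sublist l ∨ (([a] : List Int).Sublist l ∧ b = v) := by
  constructor
  · intro h
    rw [List.sublist_append_iff] at h
    obtain ⟨l₁, l₂, he, h1, h2⟩ := h
    rcases List.sublist_singleton.mp h2 with rfl | rfl
    · simp at he; subst he; exact Or.inl h1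
    · have hlen : l₁.length = 1 := by have := congrArg List.length he; simpa using this
      match l₁, hlen with
      | [x], _ =>
        simp at he
        obtain ⟨rfl, rfl⟩ := he
        exact Or.inr ⟨h1, rfl⟩
  · rintro (h | ⟨h, rfl⟩)
    · exact h.trans (List.sublist_append_left l [v])
    · exact List.Sublist.append h (List.Sublist.refl _)
theorem sublist3_concat (l : List Int) (v a b c : Int) :
    ([a, b, c] : List Int).Sublist (l ++ [v]) ↔
      ([a, b, c] : List Int).Sublist l ∨ (([a, b] : List Int).Sublist l ∧ c = v) := by
  constructor
  · intro h
    rw [List.sublist_append_iff] at h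
    obtain ⟨l₁, l₂, he, h1, h2⟩ := h
    rcases List.sublist_singleton.mp h2 with rfl | rfl
    · simp at he; subst he; exact Or.inl h1
    · have hlen : l₁.length = 2 := by have := congrArg List.length he; simpa using this
      match l₁, hlen with
      | [x, y], _ =>
        simp at he
        obtain ⟨rfl, rfl, rfl⟩ := he
        exact Or.inr ⟨h1, rfl⟩
  · rintro (h | ⟨h, rfl⟩)
    · exact h.trans (List.sublist_append_left l [v])
    · exact List.Sublist.append h (List.Sublist.refl _)

-- B's loop invariant
theorem zinc_inv (A : List Int) :
    let st := A.foldl zincStep (PySem.Set.empty, PySem.Set.empty, PySem.Set.empty)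
    (st.1.Nodup ∧ st.2.1.Nodup ∧ st.2.2.Nodup) ∧
    (∀ x, x ∈ st.1 ↔ ∃ u, ([u] : List Int).Sublist A ∧ x = PySem.Int.toStr u) ∧
    (∀ x, x ∈ st.2.1 ↔ ∃ u v, ([u, v] : List Int).Sublist A ∧
        x = PySem.Int.toStr u ++ PySem.Int.toStr v) ∧
    (∀ x, x ∈ st.2.2 ↔ ∃ u v w, ([u, v, w] : List Int).Sublist A ∧
        x = PySem.Int.toStr u ++ PySem.Int.toStr v ++ PySem.Int.toStr w) := by
  induction A using List.reverseRecOn with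
  | nil =>
    refine ⟨⟨List.nodup_nil, List.nodup_nil, List.nodup_nil⟩, ?_, ?_, ?_⟩
    · intro x
      constructor
      · intro hx; cases hx
      · rintro ⟨u, hu, -⟩; cases List.eq_nil_of_sublist_nil hu
    · intro x
      constructor
      · intro hx; cases hx
      · rintro ⟨u, v, hu, -⟩; cases List.eq_nil_of_sublist_nil hu
    · intro x
      constructor
      · intro hx; cases hx
      · rintro ⟨u, v, w, hu, -⟩; cases List.eq_nil_of_sublist_nil hu
  | append_singleton l v ih =>
    obtain ⟨⟨n1, n2, n3⟩, hs, hp, ht⟩ := ih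
    rw [List.foldl_append]
    simp only [List.foldl_cons, List.foldl_nil]
    refine ⟨⟨PySem.Set.nodup_add _ _ n1, PySem.Set.nodup_union _ _ n2, PySem.Set.nodup_union _ _ n3⟩,
      ?_, ?_, ?_⟩
    · intro x
      simp only [zincStep, PySem.Set.mem_add]
      rw [hs]
      constructor
      · rintro (⟨u, hu, rfl⟩ | rfl)
        · exact ⟨u, (sublist1_concat l v u).mpr (Or.inl hu), rfl⟩
        · exact ⟨v, (sublist1_concat l v v).mpr (Or.inr rfl), rfl⟩
      · rintro ⟨u, hu, rfl⟩
        rcases (sublist1_concat l v u).mp hu with h | rfl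
        · exact Or.inl ⟨u, h, rfl⟩
        · exact Or.inr rfl
    · intro x
      simp only [zincStep, PySem.Set.mem_union, List.mem_map]
      constructor
      · rintro (h | ⟨q, hq, rfl⟩)
        · obtain ⟨u, w, hu, rfl⟩ := (hp x).mp h
          exact ⟨u, w, (sublist2_concat l v u w).mpr (Or.inl hu), rfl⟩
        · obtain ⟨u, hu, rfl⟩ := (hs q).mp hq
          exact ⟨u, v, (sublist2_concat l v u v).mpr (Or.inr ⟨hu, rfl⟩), rfl⟩
      · rintro ⟨u, w, hu, rfl⟩
        rcases (sublist2_concat l v u w).mp hu with h | ⟨h, rfl⟩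
        · exact Or.inl ((hp _).mpr ⟨u, w, h, rfl⟩)
        · exact Or.inr ⟨PySem.Int.toStr u, (hs _).mpr ⟨u, h, rfl⟩, rfl⟩
    · intro x
      simp only [zincStep, PySem.Set.mem_union, List.mem_map]
      constructor
      · rintro (h | ⟨q, hq, rfl⟩)
        · obtain ⟨u, w, z, hu, rfl⟩ := (ht x).mp h
          exact ⟨u, w, z, (sublist3_concat l v u w z).mpr (Or.inl hu), rfl⟩
        · obtain ⟨u, w, hu, rfl⟩ := (hp q).mp hq
          exact ⟨u, w, v, (sublist3_concat l v u w v).mpr (Or.inr ⟨hu, rfl⟩), rfl⟩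
      · rintro ⟨u, w, z, hu, rfl⟩
        rcases (sublist3_concat l v u w z).mp hu with h | ⟨h, rfl⟩
        · exact Or.inl ((ht _).mpr ⟨u, w, z, h, rfl⟩)
        · exact Or.inr ⟨PySem.Int.toStr u ++ PySem.Int.toStr w, (hp _).mpr ⟨u, w, h, rfl⟩, rfl⟩

-- ===== VERDICT (by name: the statement is the Claim_ definition above) =====
theorem solution_spec : Claim_equal_solution := by
  intro A _
  unfold Spec_solution solution solution_alt
  obtain ⟨⟨_, _, n3⟩, _, _, ht⟩ := zinc_inv A
  by_cases h3 : A.length < 3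
  · rw [if_pos h3]
    have : (A.foldl zincStep (PySem.Set.empty, PySem.Set.empty, PySem.Set.empty)).2.2 = [] := by
      apply List.eq_nil_iff_forall_not_mem.mpr
      intro x hx
      obtain ⟨u, v, w, hsub, _⟩ := (ht x).mp hx
      have := hsub.length_le
      simp at this; omega
    rw [this]; rfl
  · rw [if_neg h3]
    have key : ∀ x, x ∈ solStep A A.length 0 1 2 PySem.Set.empty ↔
        x ∈ (A.foldl zincStep (PySem.Set.empty, PySem.Set.empty, PySem.Set.empty)).2.2 := by
      intro x
      rw [mem_solStep A A.length 0 1 2 PySem.Set.empty x rfl (by omega) (by omega) (by omega)]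
      rw [ht x, ← idx_triple_iff_sublist]
      constructor
      · rintro (h | ⟨a, b, c, hab, hbc, hcn, _, rfl⟩)
        · simp [PySem.Set.empty] at h
        · exact ⟨a, b, c, hab, hbc, hcn, rfl⟩
      · rintro ⟨a, b, c, hab, hbc, hcn, rfl⟩
        exact Or.inr ⟨a, b, c, hab, hbc, hcn, by unfold lexGe; omega, rfl⟩
    have hperm := (List.perm_ext_iff_of_nodup
      (nodup_solStep A A.length 0 1 2 PySem.Set.empty List.nodup_nil) n3).mpr key
    simp only [PySem.Set.len]
    rw [hperm.length_eq]
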